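-- pv_equiv track=rewrite | github.com/thumbe12856/competitive-programming | cf/1700 Or Game/solve.py | solve
-- ===== SOURCE A (Python) =====
-- def solve(N, K, X, A):
--     prefix, suffix = [0] * (N + 1), [0] * (N + 1)
--     for i in range(N):
--         prefix[i] = prefix[i - 1] | A[i]
--
--     for i in range(N - 1, -1, -1):
--         suffix[i] = suffix[i + 1] | A[i]
--
--     ans = 0
--     val = X ** K
--     for i in range(N):
--         ans = max(
--             ans,
--             prefix[i - 1] | A[i] * val | suffix[i + 1]
--         )
--
--     return ans
-- ===== SOURCE B (Python) =====
-- def solve(N, K, X, A):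
--     # Divide and conquer instead of prefix/suffix arrays: best(seg, outside) returns
--     # the best candidate obtainable by boosting one element of seg, where `outside`
--     # is the OR of all elements outside seg.
--     val = X ** K
--     xs = A[:max(N, 0)]
--
--     def or_all(seg):
--         acc = 0
--         for a in seg:
--             acc |= a
--         return acc
--
--     def best(seg, outside):
--         if not seg:
--             return 0
--         if len(seg) == 1:
--             return outside | seg[0] * val
--         m = len(seg) // 2
--         left, right = seg[:m], seg[m:]
--         return max(best(left, outside | or_all(right)),
--                    best(right, outside | or_all(left)))
--
--     return max(best(xs, 0), 0)
-- ===== Notes on version B (the rewrite author's own statement) =====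
-- stated objective: alternative
-- what changed: Replaced A's three index loops over sentinel-padded prefix/suffix OR arrays by a recursive divide-and-conquer: best(seg, outside) splits the segment in half and recurses on each half with the OR of everything outside it, so no prefix/suffix tables or index arithmetic exist; the trade is O(n log n) work instead of A's O(n).
import Mathlib
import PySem

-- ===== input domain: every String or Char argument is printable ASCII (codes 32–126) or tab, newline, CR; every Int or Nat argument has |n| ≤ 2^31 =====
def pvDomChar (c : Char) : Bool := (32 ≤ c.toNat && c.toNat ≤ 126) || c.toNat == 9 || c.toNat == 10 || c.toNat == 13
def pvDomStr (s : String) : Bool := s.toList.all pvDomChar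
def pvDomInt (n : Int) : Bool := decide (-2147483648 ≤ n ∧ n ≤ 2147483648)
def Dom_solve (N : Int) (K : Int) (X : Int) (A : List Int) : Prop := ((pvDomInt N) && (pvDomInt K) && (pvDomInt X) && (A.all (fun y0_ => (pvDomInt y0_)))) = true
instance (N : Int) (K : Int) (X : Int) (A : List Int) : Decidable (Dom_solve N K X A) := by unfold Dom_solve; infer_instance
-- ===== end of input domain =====

-- B replaces A's three index loops over sentinel-padded prefix/suffix OR arrays by a
-- recursive divide and conquer that carries the OR of the elements outside the current
-- segment; equal return values are proved on Pre_.

-- ===== PORT A =====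
-- pyGetD with default 0 stands in for Python's raising indexing; on Pre_ every read is in
-- range (including the wrapped prefix[-1]/suffix[-1] reads, which pyGetD resolves as Python does).
def solve (N : Int) (K : Int) (X : Int) (A : List Int) : Int :=
  let pfx0 : List Int := List.replicate (N + 1).toNat 0
  let sfx0 : List Int := List.replicate (N + 1).toNat 0
  let pfx := (PySem.List.pyRange 0 N 1).foldl (fun p i =>
    PySem.List.pySetD p i (PySem.Int.bor (PySem.List.pyGetD p (i - 1) 0) (PySem.List.pyGetD A i 0))) pfx0
  let sfx := (PySem.List.pyRange (N - 1) (-1) (-1)).foldl (fun s i =>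
    PySem.List.pySetD s i (PySem.Int.bor (PySem.List.pyGetD s (i + 1) 0) (PySem.List.pyGetD A i 0))) sfx0
  let val := X ^ K.toNat
  (PySem.List.pyRange 0 N 1).foldl (fun ans i =>
    max ans (PySem.Int.bor (PySem.Int.bor (PySem.List.pyGetD pfx (i - 1) 0)
      ((PySem.List.pyGetD A i 0) * val)) (PySem.List.pyGetD sfx (i + 1) 0))) 0

-- ===== PORT B =====
-- or_all: running OR of a segment
def orAcc (seg : List Int) : Int := seg.foldl (fun acc a => PySem.Int.bor acc a) 0

-- best(seg, outside): divide and conquer; seg[:m]/seg[m:] with 0 ≤ m ≤ len are exactly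
-- take/drop. The extra fuel argument (segment length at the top call) only bounds the
-- recursion depth for totality; the halving recursion never exhausts it.
def bestDC (val : Int) : Nat → List Int → Int → Int
  | _, [], _ => 0
  | _, [a], outside => PySem.Int.bor outside (a * val)
  | 0, _ :: _ :: _, _ => 0
  | fuel + 1, a :: b :: rest, outside =>
    max
      (bestDC val fuel ((a :: b :: rest).take ((a :: b :: rest).length / 2))
        (PySem.Int.bor outside (orAcc ((a :: b :: rest).drop ((a :: b :: rest).length / 2)))))
      (bestDC val fuel ((a :: b :: rest).drop ((a :: b :: rest).length / 2))
        (PySem.Int.bor outside (orAcc ((a :: b :: rest).take ((a :: b :: rest).length / 2)))))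

def solve_alt (N : Int) (K : Int) (X : Int) (A : List Int) : Int :=
  let val := X ^ K.toNat
  let xs := PySem.List.slice A none (some (max N 0))
  max (bestDC val xs.length xs 0) 0

-- ===== PRECONDITION & SPEC =====
-- Pre_ excludes exactly the inputs where the Python A raises or leaves Int: N > len(A)
-- (IndexError), and K < 0 unless the loops are empty and X ≠ 0 (X**K is a float, so
-- `|` raises TypeError, or ZeroDivisionError when X = 0).
def Pre_solve (N : Int) (K : Int) (X : Int) (A : List Int) : Prop :=
  N ≤ (A.length : Int) ∧ (0 ≤ K ∨ (N ≤ 0 ∧ X ≠ 0))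
instance (N : Int) (K : Int) (X : Int) (A : List Int) : Decidable (Pre_solve N K X A) := by
  unfold Pre_solve; infer_instance

def pvWitness_solve : Int × Int × Int × List Int := (3, 2, 2, [1, 2, 4])

def Spec_solve (N : Int) (K : Int) (X : Int) (A : List Int) (out : Int) : Prop := out = solve_alt N K X A
instance (N : Int) (K : Int) (X : Int) (A : List Int) (out : Int) : Decidable (Spec_solve N K X A out) := by unfold Spec_solve; infer_instance

-- ===== CLAIM (what is proved, stated in full; the proofs are below) =====
def Claim_equal_solve : Prop := ∀ (N : Int) (K : Int) (X : Int) (A : List Int), Dom_solve N K X A → Pre_solve N K X A → Spec_solve N K X A (solve N K X A)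

-- ===== LEMMAS AND PROOFS =====

-- ---- bitwise OR on Int: associativity etc. via a per-bit characterization ----

-- bit k of an integer in Python's infinite two's complement
def ibit (a : Int) (k : Nat) : Bool :=
  if 0 ≤ a then a.toNat.testBit k else !((-a - 1).toNat.testBit k)

theorem and_mod_two (n m : Nat) : (n &&& m) % 2 = min (n % 2) (m % 2) := by
  have h : (n &&& m).testBit 0 = (n.testBit 0 && m.testBit 0) := Nat.testBit_and n m 0
  simp only [Nat.testBit_zero] at h
  rcases Nat.mod_two_eq_zero_or_one n with hn | hn <;>
    rcases Nat.mod_two_eq_zero_or_one m with hm | hm <;>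
    rcases Nat.mod_two_eq_zero_or_one (n &&& m) with hc | hc <;>
    simp [hn, hm, hc] at h ⊢

theorem sub_and_decomp (n m : Nat) :
    n - (n &&& m) = 2 * (n / 2 - (n / 2 &&& m / 2)) + (n % 2 - (n &&& m) % 2) := by
  have hd : (n &&& m) / 2 = n / 2 &&& m / 2 := Nat.and_div_two
  have hle : n &&& m ≤ n := Nat.and_le_left
  have hm2 : (n &&& m) % 2 = min (n % 2) (m % 2) := and_mod_two n m
  have h3 : (n &&& m) / 2 ≤ n / 2 := Nat.div_le_div_right hle
  omega

theorem sub_and_testBit (k : Nat) : ∀ n m : Nat,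
    (n - (n &&& m)).testBit k = (n.testBit k && !(m.testBit k)) := by
  induction k with
  | zero =>
    intro n m
    simp only [Nat.testBit_zero]
    have hdec := sub_and_decomp n m
    have hm2 := and_mod_two n m
    have hmod : (n - (n &&& m)) % 2 = n % 2 - (n &&& m) % 2 := by omega
    rcases Nat.mod_two_eq_zero_or_one n with hn | hn <;>
      rcases Nat.mod_two_eq_zero_or_one m with hm | hm <;>
      simp [hmod, hm2, hn, hm]
  | succ k ih =>
    intro n m
    have hdiv : (n - (n &&& m)) / 2 = n / 2 - (n / 2 &&& m / 2) := by
      have hdec := sub_and_decomp n m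
      have hm2 := and_mod_two n m
      omega
    rw [Nat.testBit_succ, Nat.testBit_succ, Nat.testBit_succ, hdiv]
    exact ih (n / 2) (m / 2)

theorem ibit_bor (a b : Int) (k : Nat) :
    ibit (PySem.Int.bor a b) k = (ibit a k || ibit b k) := by
  unfold ibit PySem.Int.bor
  by_cases ha : 0 ≤ a <;> by_cases hb : 0 ≤ b <;>
    simp only [ha, hb, if_true, if_false]
  · rw [if_pos (by positivity), Int.toNat_natCast, Nat.testBit_or]
  · rw [if_neg (by omega)]
    have hrt : (-(-(((-b - 1).toNat - ((-b - 1).toNat &&& a.toNat) : Nat) : Int) - 1) - 1).toNat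
        = (-b - 1).toNat - ((-b - 1).toNat &&& a.toNat) := by omega
    rw [hrt, sub_and_testBit]
    cases a.toNat.testBit k <;> cases ((-b - 1).toNat).testBit k <;> rfl
  · rw [if_neg (by omega)]
    have hrt : (-(-(((-a - 1).toNat - ((-a - 1).toNat &&& b.toNat) : Nat) : Int) - 1) - 1).toNat
        = (-a - 1).toNat - ((-a - 1).toNat &&& b.toNat) := by omega
    rw [hrt, sub_and_testBit]
    cases b.toNat.testBit k <;> cases ((-a - 1).toNat).testBit k <;> rfl
  · rw [if_neg (by omega)]
    have hrt : (-(-((((-a - 1).toNat &&& (-b - 1).toNat : Nat)) : Int) - 1) - 1).toNat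
        = (-a - 1).toNat &&& (-b - 1).toNat := by omega
    rw [hrt, Nat.testBit_and]
    cases ((-a - 1).toNat).testBit k <;> cases ((-b - 1).toNat).testBit k <;> rfl

theorem ibit_ext {a b : Int} (h : ∀ k, ibit a k = ibit b k) : a = b := by
  unfold ibit at h
  by_cases ha : 0 ≤ a <;> by_cases hb : 0 ≤ b
  · have := Nat.eq_of_testBit_eq (x := a.toNat) (y := b.toNat)
      (fun k => by have hk := h k; rw [if_pos ha, if_pos hb] at hk; exact hk)
    omega
  · exfalso
    have hk := h (a.toNat + (-b - 1).toNat)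
    rw [if_pos ha, if_neg hb] at hk
    rw [Nat.testBit_eq_false_of_lt
        (lt_of_le_of_lt (Nat.le_add_right _ _) Nat.lt_two_pow_self),
      Nat.testBit_eq_false_of_lt
        (lt_of_le_of_lt (Nat.le_add_left _ _) Nat.lt_two_pow_self)] at hk
    simp at hk
  · exfalso
    have hk := h ((-a - 1).toNat + b.toNat)
    rw [if_neg ha, if_pos hb] at hk
    rw [Nat.testBit_eq_false_of_lt
        (lt_of_le_of_lt (Nat.le_add_left _ _) Nat.lt_two_pow_self),
      Nat.testBit_eq_false_of_lt
        (lt_of_le_of_lt (Nat.le_add_right _ _) Nat.lt_two_pow_self)] at hk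
    simp at hk
  · have := Nat.eq_of_testBit_eq (x := (-a - 1).toNat) (y := (-b - 1).toNat)
      (fun k => by
        have hk := h k
        rw [if_neg ha, if_neg hb] at hk
        exact Bool.not_inj hk)
    omega

theorem borA (a b c : Int) :
    PySem.Int.bor (PySem.Int.bor a b) c = PySem.Int.bor a (PySem.Int.bor b c) :=
  ibit_ext (fun k => by simp [ibit_bor, Bool.or_assoc])

theorem borC (a b : Int) : PySem.Int.bor a b = PySem.Int.bor b a :=
  PySem.Int.bor_comm a b

theorem borLC (a b c : Int) :
    PySem.Int.bor a (PySem.Int.bor b c) = PySem.Int.bor b (PySem.Int.bor a c) :=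
  ibit_ext (fun k => by simp [ibit_bor, Bool.or_left_comm])

theorem zero_bor (a : Int) : PySem.Int.bor 0 a = a := by
  rw [borC]; exact PySem.Int.bor_zero a

-- ---- OR of a list ----
def orL (l : List Int) : Int := l.foldl (fun acc a => PySem.Int.bor acc a) 0
def orR (l : List Int) : Int := l.foldr (fun a b => PySem.Int.bor a b) 0

theorem orAcc_eq_orL : orAcc = orL := rfl

theorem foldl_bor (l : List Int) : ∀ a : Int,
    l.foldl (fun acc x => PySem.Int.bor acc x) a = PySem.Int.bor a (orL l) := by
  induction l with
  | nil => intro a; simp [orL, PySem.Int.bor_zero]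
  | cons b t ih =>
    intro a
    simp only [orL, List.foldl_cons]
    rw [ih (PySem.Int.bor a b), ih (PySem.Int.bor 0 b), zero_bor, borA]

theorem orL_cons (a : Int) (l : List Int) : orL (a :: l) = PySem.Int.bor a (orL l) :=
  calc orL (a :: l) = l.foldl (fun acc x => PySem.Int.bor acc x) (PySem.Int.bor 0 a) := rfl
    _ = PySem.Int.bor (PySem.Int.bor 0 a) (orL l) := foldl_bor l _
    _ = PySem.Int.bor a (orL l) := by rw [zero_bor]

theorem orL_append (l1 l2 : List Int) : orL (l1 ++ l2) = PySem.Int.bor (orL l1) (orL l2) := by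
  rw [show orL (l1 ++ l2) = l2.foldl (fun acc x => PySem.Int.bor acc x) (orL l1) from by
    simp only [orL, List.foldl_append]]
  exact foldl_bor l2 (orL l1)

theorem orL_concat (l : List Int) (a : Int) : orL (l ++ [a]) = PySem.Int.bor (orL l) a := by
  simp [orL, List.foldl_append]

theorem orL_reverse (l : List Int) : orL l.reverse = orL l := by
  induction l with
  | nil => rfl
  | cons a l ih =>
    rw [List.reverse_cons, orL_concat, ih, orL_cons, borC]

-- ---- state of A's arrays (A-side characterization) ----
def pListF (A : List Int) (n k : Nat) : List Int :=
  (List.range (n + 1)).map (fun j => if j < k then orL (A.take (j + 1)) else 0)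

def sValF (A : List Int) (n j : Nat) : Int := orL ((A.take n).drop j).reverse
def sListF (A : List Int) (n k : Nat) : List Int :=
  (List.range (n + 1)).map (fun j => if k ≤ j then sValF A n j else 0)

theorem length_pListF (A : List Int) (n k : Nat) : (pListF A n k).length = n + 1 := by
  simp [pListF]

theorem pListF_get_pred (A : List Int) (n k i : Nat) (hik : i ≤ k) (hkn : k ≤ n) :
    PySem.List.pyGetD (pListF A n k) ((i : Int) - 1) 0 = orL (A.take i) := by
  match i with
  | 0 =>
    rw [show ((0 : Nat) : Int) - 1 = -1 by norm_num]
    rw [PySem.List.pyGetD.eq_1, PySem.List.pyGet?.eq_1, length_pListF]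
    rw [PySem.List.pyIdx?.eq_1]
    rw [if_neg (by omega), if_pos (by omega)]
    have hnn : n + 1 - (-(-1 : Int)).toNat = n := by omega
    rw [hnn]
    simp only [pListF, Option.bind_some, List.getElem?_map]
    rw [List.getElem?_range (by omega)]
    simp only [Option.map_some, Option.getD_some]
    rw [if_neg (by omega)]
    simp [orL]
  | i + 1 =>
    rw [show ((i + 1 : Nat) : Int) - 1 = ((i : Nat) : Int) by push_cast; ring]
    rw [PySem.List.pyGetD_natCast]
    unfold pListF
    rw [PySem.List.getD_map_range _ _ _ _ (by omega)]
    rw [if_pos (by omega)]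

theorem pListF_set_succ (A : List Int) (n k : Nat) (_hk : k ≤ n) :
    (pListF A n k).set k (orL (A.take (k + 1))) = pListF A n (k + 1) := by
  apply List.ext_getElem
  · simp [pListF]
  · intro j h1 h2
    simp only [pListF, List.getElem_set, List.getElem_map, List.getElem_range,
      List.length_set, List.length_map, List.length_range] at h1 h2 ⊢
    by_cases hjk : k = j
    · subst hjk
      rw [if_pos rfl, if_pos (by omega)]
    · rw [if_neg hjk]
      by_cases hlt : j < k
      · rw [if_pos hlt, if_pos (by omega)]
      · rw [if_neg hlt, if_neg (by omega)]

theorem pfx_loop (A : List Int) (n : Nat) (hlen : n ≤ A.length) :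
    ∀ k, k ≤ n → (PySem.List.pyRange 0 (k : Int) 1).foldl
      (fun p i => PySem.List.pySetD p i
        (PySem.Int.bor (PySem.List.pyGetD p (i - 1) 0) (PySem.List.pyGetD A i 0)))
      (List.replicate (n + 1) 0) = pListF A n k := by
  intro k
  induction k with
  | zero =>
    intro _hk
    rw [PySem.List.pyRange_one_eq_nil (by norm_num)]
    apply List.ext_getElem
    · simp [pListF]
    · intro j h1 h2
      simp [pListF]
  | succ k ih =>
    intro hk
    have hk' : k ≤ n := by omega
    rw [show ((k + 1 : Nat) : Int) = (k : Int) + 1 by push_cast; ring]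
    rw [PySem.List.pyRange_one_succ_right (by exact_mod_cast k.zero_le)]
    rw [List.foldl_append, ih hk', List.foldl_cons, List.foldl_nil]
    rw [pListF_get_pred A n k k (le_refl k) hk']
    rw [PySem.List.pyGetD_natCast, PySem.List.pySetD_natCast]
    have hkl : k < A.length := by omega
    have hval : PySem.Int.bor (orL (A.take k)) (A.getD k 0) = orL (A.take (k + 1)) := by
      rw [List.take_add_one, List.getElem?_eq_getElem hkl]
      simp only [Option.toList_some]
      rw [orL_concat, List.getD_eq_getElem _ _ hkl]
    rw [hval, pListF_set_succ A n k hk']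

theorem sListF_get (A : List Int) (n k j : Nat) (hj : j ≤ n) (hkj : k ≤ j) :
    PySem.List.pyGetD (sListF A n k) (j : Int) 0 = sValF A n j := by
  rw [PySem.List.pyGetD_natCast]
  unfold sListF
  rw [PySem.List.getD_map_range _ _ _ _ (by omega)]
  rw [if_pos hkj]

theorem sListF_set_pred (A : List Int) (n k : Nat) (_hk : k ≤ n) :
    (sListF A n (k + 1)).set k (sValF A n k) = sListF A n k := by
  apply List.ext_getElem
  · simp [sListF]
  · intro j h1 h2
    simp only [sListF, List.getElem_set, List.getElem_map, List.getElem_range,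
      List.length_set, List.length_map, List.length_range] at h1 h2 ⊢
    by_cases hjk : k = j
    · subst hjk
      rw [if_pos rfl, if_pos (by omega)]
    · rw [if_neg hjk]
      by_cases hle : k + 1 ≤ j
      · rw [if_pos hle, if_pos (by omega)]
      · rw [if_neg hle, if_neg (by omega)]

theorem sfx_loop (A : List Int) (n : Nat) (hlen : n ≤ A.length) :
    ∀ k, k ≤ n → (PySem.List.pyRange ((k : Int) - 1) (-1) (-1)).foldl
      (fun s i => PySem.List.pySetD s i
        (PySem.Int.bor (PySem.List.pyGetD s (i + 1) 0) (PySem.List.pyGetD A i 0)))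
      (sListF A n k) = sListF A n 0 := by
  intro k
  induction k with
  | zero =>
    intro _hk
    rw [PySem.List.pyRange_neg_one_eq_nil (by norm_num)]
    rfl
  | succ k ih =>
    intro hk
    have hk' : k ≤ n := by omega
    have hkn : k < n := by omega
    rw [show ((k + 1 : Nat) : Int) - 1 = (k : Int) by push_cast; ring]
    rw [PySem.List.pyRange_neg_one_cons (by omega : (-1 : Int) < (k : Int))]
    rw [List.foldl_cons]
    rw [show ((k : Int) + 1) = ((k + 1 : Nat) : Int) by push_cast; ring]
    rw [sListF_get A n (k + 1) (k + 1) hk (le_refl _)]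
    rw [PySem.List.pyGetD_natCast, PySem.List.pySetD_natCast]
    have hval : PySem.Int.bor (sValF A n (k + 1)) (A.getD k 0) = sValF A n k := by
      have hkt : k < (A.take n).length := by
        rw [List.length_take]; omega
      unfold sValF
      rw [List.drop_eq_getElem_cons hkt, List.reverse_cons, orL_concat]
      rw [List.getElem_take, List.getD_eq_getElem _ _ (by omega)]
    rw [hval, sListF_set_pred A n k hk']
    exact ih hk'

theorem replicate_eq_sListF (A : List Int) (n : Nat) :
    (List.replicate (n + 1) (0 : Int)) = sListF A n n := by
  apply List.ext_getElem
  · simp [sListF]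
  · intro j h1 h2
    simp only [sListF, List.getElem_replicate, List.getElem_map, List.getElem_range,
      List.length_replicate, List.length_map, List.length_range] at h1 h2 ⊢
    by_cases hj : n ≤ j
    · rw [if_pos hj]
      have hjn : j = n := by omega
      subst hjn
      unfold sValF
      rw [List.drop_eq_nil_of_le (by simp [List.length_take])]
      rfl
    · rw [if_neg hj]

-- the list of candidate values A's final loop takes max over
def candF (A : List Int) (n : Nat) (val : Int) (i : Nat) : Int :=
  PySem.Int.bor (PySem.Int.bor (orL (A.take i)) ((A.getD i 0) * val)) (sValF A n (i + 1))

theorem ans_loop (A : List Int) (n : Nat) (val : Int) :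
    (PySem.List.pyRange 0 (n : Int) 1).foldl
      (fun ans i => max ans (PySem.Int.bor (PySem.Int.bor
        (PySem.List.pyGetD (pListF A n n) (i - 1) 0)
        ((PySem.List.pyGetD A i 0) * val)) (PySem.List.pyGetD (sListF A n 0) (i + 1) 0))) 0
    = ((List.range n).map (candF A n val)).foldl max 0 := by
  rw [PySem.List.pyRange_zero_natCast, List.foldl_map, List.foldl_map]
  apply PySem.List.foldl_congr_mem
  intro acc i hi
  have hin : i < n := List.mem_range.mp hi
  rw [pListF_get_pred A n n i (by omega) (le_refl n)]
  rw [PySem.List.pyGetD_natCast]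
  rw [show ((i : Nat) : Int) + 1 = ((i + 1 : Nat) : Int) by push_cast; ring]
  rw [sListF_get A n 0 (i + 1) (by omega) (by omega)]
  rfl

-- ---- B-side characterization: bestDC computes the max of the same candidates ----

-- candidate of segment seg at index i, with outside OR `out`
def cand (val out : Int) (seg : List Int) (i : Nat) : Int :=
  PySem.Int.bor (PySem.Int.bor out (PySem.Int.bor (orL (seg.take i)) (orL (seg.drop (i + 1)))))
    (seg.getD i 0 * val)

-- max of a nonempty list (0 on [])
def lmax : List Int → Int
  | [] => 0
  | a :: l => l.foldl max a

theorem foldl_max_assoc (l : List Int) : ∀ a b : Int,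
    l.foldl max (max a b) = max a (l.foldl max b) := by
  induction l with
  | nil => intro a b; rfl
  | cons c l ih =>
    intro a b
    simp only [List.foldl_cons, max_assoc, ih]

theorem lmax_append (l1 l2 : List Int) (h1 : l1 ≠ []) (h2 : l2 ≠ []) :
    lmax (l1 ++ l2) = max (lmax l1) (lmax l2) := by
  obtain ⟨a, t1, rfl⟩ := List.exists_cons_of_ne_nil h1
  obtain ⟨b, t2, rfl⟩ := List.exists_cons_of_ne_nil h2
  simp only [lmax, List.cons_append, List.foldl_append, List.foldl_cons]
  rw [foldl_max_assoc]

theorem foldl_max_zero (l : List Int) : l.foldl max 0 = max (lmax l) 0 := by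
  cases l with
  | nil => rfl
  | cons a t =>
    simp only [lmax, List.foldl_cons]
    rw [show max (0 : Int) a = max 0 a from rfl, foldl_max_assoc]
    rw [max_comm]

theorem cand_left (val out : Int) (L R : List Int) (i : Nat) (hi : i < L.length) :
    cand val out (L ++ R) i = cand val (PySem.Int.bor out (orL R)) L i := by
  unfold cand
  rw [List.take_append_of_le_length (by omega), List.drop_append_of_le_length (by omega)]
  rw [List.getD_append _ _ _ _ hi, orL_append]
  congr 1
  simp only [borC, borLC]

theorem cand_right (val out : Int) (L R : List Int) (j : Nat) :
    cand val out (L ++ R) (L.length + j) = cand val (PySem.Int.bor out (orL L)) R j := by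
  have ht : (L ++ R).take (L.length + j) = L ++ R.take j := by
    rw [List.take_append, List.take_of_length_le (by omega),
      show L.length + j - L.length = j by omega]
  have hd : (L ++ R).drop (L.length + j + 1) = R.drop (j + 1) := by
    rw [List.drop_append, List.drop_eq_nil_of_le (by omega),
      show L.length + j + 1 - L.length = j + 1 by omega, List.nil_append]
  have hg : (L ++ R).getD (L.length + j) 0 = R.getD j 0 := by
    rw [List.getD_append_right _ _ _ _ (by omega), show L.length + j - L.length = j by omega]
  unfold cand
  rw [ht, hd, hg, orL_append]
  congr 1
  simp only [borC, borLC]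

theorem bestDC_eq (val : Int) : ∀ (fuel : Nat) (seg : List Int), seg.length ≤ fuel →
    ∀ out, bestDC val fuel seg out = lmax ((List.range seg.length).map (cand val out seg)) := by
  intro fuel
  induction fuel with
  | zero =>
    intro seg hlen out
    cases seg with
    | nil => simp [bestDC, lmax]
    | cons a t => simp at hlen
  | succ fuel ih =>
    intro seg hlen out
    match seg with
    | [] => simp [bestDC, lmax]
    | [a] =>
      simp [bestDC, lmax, cand, orL, PySem.Int.bor_zero]
    | a :: b :: rest =>
      rw [bestDC]
      set sg := a :: b :: rest with hsg
      have hlen2 : 2 ≤ sg.length := by simp [hsg]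
      set m := sg.length / 2 with hm
      have hm1 : 1 ≤ m := by omega
      have hmlt : m < sg.length := by omega
      have hLlen : (sg.take m).length = m := by
        rw [List.length_take]; omega
      have hRlen : (sg.drop m).length = sg.length - m := by
        rw [List.length_drop]
      have hsplit : sg = sg.take m ++ sg.drop m := (List.take_append_drop m sg).symm
      rw [ih (sg.take m) (by omega) _, ih (sg.drop m) (by omega) _]
      rw [hLlen, hRlen]
      conv_rhs => rw [show sg.length = m + (sg.length - m) by omega, List.range_add]
      rw [List.map_append, List.map_map]
      rw [lmax_append _ _
        (by simp only [ne_eq, List.map_eq_nil_iff, List.range_eq_nil]; omega)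
        (by simp only [ne_eq, List.map_eq_nil_iff, List.range_eq_nil]; omega)]
      congr 1
      · apply congrArg
        apply List.map_congr_left
        intro i hi
        have hi' : i < m := List.mem_range.mp hi
        rw [orAcc_eq_orL]
        conv_rhs => rw [hsplit]
        exact (cand_left val out _ _ i (by omega)).symm
      · apply congrArg
        apply List.map_congr_left
        intro j hj
        have hj' : j < sg.length - m := List.mem_range.mp hj
        simp only [Function.comp_apply]
        rw [orAcc_eq_orL]
        conv_rhs => rw [hsplit]
        rw [show m + j = (sg.take m).length + j by omega]
        exact (cand_right val out _ _ j).symm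

-- A's candidate equals B's candidate on the truncated list
theorem candF_eq_cand (A : List Int) (n : Nat) (val : Int) (hlen : n ≤ A.length)
    (i : Nat) (hi : i < n) : candF A n val i = cand val 0 (A.take n) i := by
  unfold candF cand sValF
  rw [List.take_take, min_eq_left (by omega : i ≤ n)]
  rw [orL_reverse]
  have hgd : (A.take n).getD i 0 = A.getD i 0 := by
    rw [List.getD_eq_getElem _ _ (by rw [List.length_take]; omega),
        List.getD_eq_getElem _ _ (by omega), List.getElem_take]
  rw [hgd, zero_bor]
  simp only [borC, borLC]

-- ===== VERDICT (by name: the statement is the Claim_ definition above) =====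
theorem solve_spec : Claim_equal_solve := by
  intro N K X A _ hPre
  rcases hPre with ⟨hlen, _⟩
  unfold Spec_solve
  simp only [solve, solve_alt]
  by_cases hN : 0 ≤ N
  · obtain ⟨n, rfl⟩ := Int.eq_ofNat_of_zero_le hN
    have hln : n ≤ A.length := by exact_mod_cast hlen
    have h1 : ((n : Int) + 1).toNat = n + 1 := by omega
    simp only [h1]
    simp only [pfx_loop A n hln n (le_refl n)]
    simp only [replicate_eq_sListF A n]
    simp only [sfx_loop A n hln n (le_refl n)]
    rw [ans_loop A n (X ^ K.toNat)]
    rw [max_eq_left (by exact_mod_cast n.zero_le : (0 : Int) ≤ (n : Int))]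
    rw [PySem.List.slice_to A (by exact_mod_cast n.zero_le)]
    rw [Int.toNat_natCast]
    rw [bestDC_eq (X ^ K.toNat) (A.take n).length (A.take n) le_rfl 0]
    have hlt : (A.take n).length = n := by rw [List.length_take]; omega
    rw [hlt, foldl_max_zero]
    congr 2
    apply List.map_congr_left
    intro i hi
    exact candF_eq_cand A n (X ^ K.toNat) hln i (List.mem_range.mp hi)
  · rw [not_le] at hN
    rw [PySem.List.pyRange_one_eq_nil (by omega : N ≤ (0 : Int))]
    simp only [List.foldl_nil]
    rw [max_eq_right (by omega : N ≤ (0 : Int))]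
    rw [PySem.List.slice_to A (by norm_num)]
    simp [bestDC]
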